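-- pv_equiv track=rewrite | github.com/g0faq/PyPy | test_12.py | task_15
-- ===== SOURCE A (Python) =====
-- def task_15(tf, m, P, Q):
--     res = 0
--
--     x = 1
--     a = [1, 2]
--     p = [i for i in range(P[0], P[1] + 1)]
--     q = [i for i in range(Q[0], Q[1] + 1)]
--
--     for a1 in range(1, 99):
--         for a2 in range(a1 + 1, 100):
--             a = [i for i in range(a1, a2)]
--
--             f = True
--
--             for x in range(1, 1000):
--
--                 F = not ((x in a) and (x not in q)) or (not (x not in p) or (x in q))
--
--                 if int(F) != tf:
--                     f = False
--                     break
--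
--             if f:
--                 if m == 1:
--                     res = max(res, len(a))
--                 else:
--                     return len(a)
--
--     return res
-- ===== SOURCE B (Python) =====
-- def task_15(tf, m, P, Q):
--     # Closed-form validity: interval [a1..a2-1] passes A's x-scan iff tf == 1
--     # and every element lies in [P0..P1] u [Q0..Q1]; so the answer is a
--     # longest-run / existence question over the 98 candidate positions.
--     p0, p1 = P[0], P[1]
--     q0, q1 = Q[0], Q[1]
--     ok = lambda i: p0 <= i <= p1 or q0 <= i <= q1
--     if tf != 1:
--         return 0
--     if m != 1:
--         return 1 if any(ok(i) for i in range(1, 99)) else 0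
--     best = run = 0
--     for i in range(98, 0, -1):
--         run = run + 1 if ok(i) else 0
--         best = max(best, run)
--     return best
-- ===== Notes on version B (the rewrite author's own statement) =====
-- stated objective: faster
-- what changed: The triple nested scan (all interval pairs x a 999-point predicate scan each) is replaced by reducing the predicate in closed form: an interval is valid iff tf==1 and each of its points lies in [P0,P1] u [Q0,Q1], so B answers with a single run-length scan over the 98 candidate positions (m==1) or a single any() existence test (m!=1).
import Mathlib
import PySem

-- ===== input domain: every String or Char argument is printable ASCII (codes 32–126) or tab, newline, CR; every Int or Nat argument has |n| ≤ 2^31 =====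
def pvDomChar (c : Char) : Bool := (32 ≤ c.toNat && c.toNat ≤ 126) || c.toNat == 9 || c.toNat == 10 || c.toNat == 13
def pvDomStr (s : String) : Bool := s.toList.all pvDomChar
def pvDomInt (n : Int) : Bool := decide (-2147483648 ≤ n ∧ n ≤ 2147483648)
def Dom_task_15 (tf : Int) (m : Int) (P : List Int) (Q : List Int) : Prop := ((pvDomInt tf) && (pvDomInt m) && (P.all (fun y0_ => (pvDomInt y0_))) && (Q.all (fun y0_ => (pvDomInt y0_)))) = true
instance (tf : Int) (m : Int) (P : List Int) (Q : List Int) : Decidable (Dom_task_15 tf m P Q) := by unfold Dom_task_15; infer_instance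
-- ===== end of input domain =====

-- B replaces A's triple nested brute-force scan by a closed-form validity test and a
-- single run-length pass over the 98 candidate positions (objective: faster).

-- ===== PORT A =====
-- inner 'for x in range(1, 1000)' with break
def a15_loopX (p q a : List Int) (tf : Int) : List Int → Bool
  | [] => true
  | x :: xs =>
    let F : Bool := !(a.contains x && !(q.contains x)) || (!(!(p.contains x)) || q.contains x)
    if (if F then (1 : Int) else 0) ≠ tf then false else a15_loopX p q a tf xs

-- inner 'for a2 in range(a1 + 1, 100)': (early-return value, res)
def a15_loopA2 (tf m : Int) (p q : List Int) (a1 : Int) : List Int → Int → Option Int × Int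
  | [], res => (none, res)
  | a2 :: rest, res =>
    let a := PySem.List.pyRange a1 a2 1
    if a15_loopX p q a tf (PySem.List.pyRange 1 1000 1) then
      if m = 1 then a15_loopA2 tf m p q a1 rest (max res (a.length : Int))
      else (some (a.length : Int), res)
    else a15_loopA2 tf m p q a1 rest res

-- outer 'for a1 in range(1, 99)'
def a15_loopA1 (tf m : Int) (p q : List Int) : List Int → Int → Int
  | [], res => res
  | a1 :: rest, res =>
    match a15_loopA2 tf m p q a1 (PySem.List.pyRange (a1 + 1) 100 1) res with
    | (some r, _) => r
    | (none, res') => a15_loopA1 tf m p q rest res'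

def task_15 (tf : Int) (m : Int) (P : List Int) (Q : List Int) : Int :=
  match PySem.List.pyGet? P 0, PySem.List.pyGet? P 1, PySem.List.pyGet? Q 0, PySem.List.pyGet? Q 1 with
  | some p0, some p1, some q0, some q1 =>
    let p := PySem.List.pyRange p0 (p1 + 1) 1
    let q := PySem.List.pyRange q0 (q1 + 1) 1
    a15_loopA1 tf m p q (PySem.List.pyRange 1 99 1) 0
  | _, _, _, _ => 0

-- ===== PORT B =====
def b15_ok (p0 p1 q0 q1 i : Int) : Bool := decide ((p0 ≤ i ∧ i ≤ p1) ∨ (q0 ≤ i ∧ i ≤ q1))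

-- 'for i in range(98, 0, -1)' carrying (best, run)
def b15_scan (p0 p1 q0 q1 : Int) : List Int → Int × Int → Int × Int
  | [], s => s
  | i :: is, (best, run) =>
    let run' := if b15_ok p0 p1 q0 q1 i then run + 1 else 0
    b15_scan p0 p1 q0 q1 is (max best run', run')

def task_15_alt (tf : Int) (m : Int) (P : List Int) (Q : List Int) : Int :=
  match PySem.List.pyGet? P 0 with
  | none => 0
  | some p0 =>
    match PySem.List.pyGet? P 1 with
    | none => 0
    | some p1 =>
      match PySem.List.pyGet? Q 0 with
      | none => 0
      | some q0 =>
        match PySem.List.pyGet? Q 1 with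
        | none => 0
        | some q1 =>
          if tf ≠ 1 then 0
          else if m ≠ 1 then (if (PySem.List.pyRange 1 99 1).any (b15_ok p0 p1 q0 q1) then 1 else 0)
          else (b15_scan p0 p1 q0 q1 (PySem.List.pyRange 98 0 (-1)) (0, 0)).1

-- ===== PRECONDITION & SPEC =====
-- Pre_ excludes only inputs on which A raises IndexError (P or Q shorter than 2).
def Pre_task_15 (tf : Int) (m : Int) (P : List Int) (Q : List Int) : Prop :=
  2 ≤ P.length ∧ 2 ≤ Q.length
instance (tf : Int) (m : Int) (P : List Int) (Q : List Int) : Decidable (Pre_task_15 tf m P Q) := by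
  unfold Pre_task_15; infer_instance

def pvWitness_task_15 : Int × Int × List Int × List Int := (1, 1, [2, 5], [7, 9])

def Spec_task_15 (tf : Int) (m : Int) (P : List Int) (Q : List Int) (out : Int) : Prop := out = task_15_alt tf m P Q
instance (tf : Int) (m : Int) (P : List Int) (Q : List Int) (out : Int) : Decidable (Spec_task_15 tf m P Q out) := by unfold Spec_task_15; infer_instance

-- ===== CLAIM (what is proved, stated in full; the proofs are below) =====
def Claim_equal_task_15 : Prop := ∀ (tf : Int) (m : Int) (P : List Int) (Q : List Int), Dom_task_15 tf m P Q → Pre_task_15 tf m P Q → Spec_task_15 tf m P Q (task_15 tf m P Q)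

-- ===== LEMMAS AND PROOFS =====

-- run length of ok-positions starting at i, looking at most fuel steps
def RL (p0 p1 q0 q1 : Int) : Int → Nat → Int
  | _, 0 => 0
  | i, fuel + 1 => if b15_ok p0 p1 q0 q1 i then RL p0 p1 q0 q1 (i + 1) fuel + 1 else 0

theorem RL_nonneg (p0 p1 q0 q1 : Int) : ∀ (fuel : Nat) (i : Int), 0 ≤ RL p0 p1 q0 q1 i fuel := by
  intro fuel
  induction fuel with
  | zero => intro i; simp [RL]
  | succ n ih =>
    intro i
    simp only [RL]
    split
    · have := ih (i + 1); omega
    · omega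

theorem RL_le (p0 p1 q0 q1 : Int) : ∀ (fuel : Nat) (i : Int), RL p0 p1 q0 q1 i fuel ≤ (fuel : Int) := by
  intro fuel
  induction fuel with
  | zero => intro i; simp [RL]
  | succ n ih =>
    intro i
    simp only [RL]
    split
    · have := ih (i + 1); push_cast; omega
    · push_cast; omega

theorem RL_ok (p0 p1 q0 q1 : Int) : ∀ (fuel : Nat) (i j : Int), i ≤ j → j < i + RL p0 p1 q0 q1 i fuel →
    b15_ok p0 p1 q0 q1 j = true := by
  intro fuel
  induction fuel with
  | zero => intro i j h1 h2; simp [RL] at h2; omega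
  | succ n ih =>
    intro i j h1 h2
    simp only [RL] at h2
    by_cases hok : b15_ok p0 p1 q0 q1 i = true
    · simp [hok] at h2
      rcases eq_or_lt_of_le h1 with he | hl
      · subst he; exact hok
      · exact ih (i + 1) j (by omega) (by omega)
    · simp [hok] at h2; omega

theorem RL_stop (p0 p1 q0 q1 : Int) : ∀ (fuel : Nat) (i : Int), RL p0 p1 q0 q1 i fuel < (fuel : Int) →
    b15_ok p0 p1 q0 q1 (i + RL p0 p1 q0 q1 i fuel) = false := by
  intro fuel
  induction fuel with
  | zero => intro i h; simp [RL] at h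
  | succ n ih =>
    intro i h
    simp only [RL] at h ⊢
    by_cases hok : b15_ok p0 p1 q0 q1 i = true
    · simp [hok] at h ⊢
      have := ih (i + 1) (by omega)
      have he : i + (RL p0 p1 q0 q1 (i + 1) n + 1) = i + 1 + RL p0 p1 q0 q1 (i + 1) n := by omega
      rw [he]; exact this
    · simp [hok]

-- A's inner x-loop is a break-on-first-failure 'all'
theorem loopX_iff (p q a : List Int) (tf : Int) : ∀ xs, (a15_loopX p q a tf xs = true ↔
    ∀ x ∈ xs, (if (!(a.contains x && !(q.contains x)) || (!(!(p.contains x)) || q.contains x)) then (1 : Int) else 0) = tf) := by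
  intro xs
  induction xs with
  | nil => simp [a15_loopX]
  | cons x xs ih =>
    simp only [a15_loopX]
    by_cases hv : (if (!(a.contains x && !(q.contains x)) || (!(!(p.contains x)) || q.contains x)) then (1 : Int) else 0) = tf
    · rw [if_neg (not_not_intro hv)]
      rw [ih]
      constructor
      · rintro h y hy
        rcases List.mem_cons.mp hy with rfl | hy'
        · exact hv
        · exact h y hy'
      · intro h y hy
        exact h y (List.mem_cons_of_mem _ hy)
    · rw [if_pos hv]
      simp only [Bool.false_eq_true, false_iff]
      push Not
      exact ⟨x, List.mem_cons_self, hv⟩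

-- the boolean F, decoded
theorem F_iff (p0 p1 q0 q1 : Int) (a : List Int) (x : Int) :
    (!(a.contains x && !((PySem.List.pyRange q0 (q1 + 1) 1).contains x)) ||
      (!(!((PySem.List.pyRange p0 (p1 + 1) 1).contains x)) || (PySem.List.pyRange q0 (q1 + 1) 1).contains x)) = true ↔
    (x ∈ a → b15_ok p0 p1 q0 q1 x = true) := by
  simp [b15_ok, PySem.List.mem_pyRange_one]
  tauto

-- the x-scan in closed form
theorem loopX_char (p0 p1 q0 q1 tf a1 a2 : Int) (h1 : 1 ≤ a1) (h2 : a2 ≤ 100) :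
    (a15_loopX (PySem.List.pyRange p0 (p1 + 1) 1) (PySem.List.pyRange q0 (q1 + 1) 1)
      (PySem.List.pyRange a1 a2 1) tf (PySem.List.pyRange 1 1000 1) = true ↔
    (tf = 1 ∧ ∀ x ∈ PySem.List.pyRange a1 a2 1, b15_ok p0 p1 q0 q1 x = true)) := by
  rw [loopX_iff]
  constructor
  · intro h
    have h999 := h 999 (by rw [PySem.List.mem_pyRange_one]; omega)
    have hm : (999 : Int) ∉ PySem.List.pyRange a1 a2 1 := by
      rw [PySem.List.mem_pyRange_one]; omega
    have hF : (!((PySem.List.pyRange a1 a2 1).contains 999 && !((PySem.List.pyRange q0 (q1 + 1) 1).contains 999)) ||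
        (!(!((PySem.List.pyRange p0 (p1 + 1) 1).contains 999)) || (PySem.List.pyRange q0 (q1 + 1) 1).contains 999)) = true := by
      rw [F_iff]; intro hx; exact absurd hx hm
    rw [if_pos hF] at h999
    refine ⟨h999.symm, ?_⟩
    intro x hx
    have hxmem := PySem.List.mem_pyRange_one.mp hx
    have hxx := h x (by rw [PySem.List.mem_pyRange_one]; omega)
    by_cases hF2 : (!((PySem.List.pyRange a1 a2 1).contains x && !((PySem.List.pyRange q0 (q1 + 1) 1).contains x)) ||
        (!(!((PySem.List.pyRange p0 (p1 + 1) 1).contains x)) || (PySem.List.pyRange q0 (q1 + 1) 1).contains x)) = true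
    · exact (F_iff p0 p1 q0 q1 _ x).mp hF2 hx
    · rw [if_neg hF2] at hxx
      omega
  · rintro ⟨rfl, hall⟩ x hx
    have hF : (!((PySem.List.pyRange a1 a2 1).contains x && !((PySem.List.pyRange q0 (q1 + 1) 1).contains x)) ||
        (!(!((PySem.List.pyRange p0 (p1 + 1) 1).contains x)) || (PySem.List.pyRange q0 (q1 + 1) 1).contains x)) = true := by
      rw [F_iff]; intro hxa; exact hall x hxa
    rw [if_pos hF]

theorem valid_iff_le_RL (p0 p1 q0 q1 a1 a2 : Int) (fuel : Nat) (_h1 : a1 < a2) (h2 : a2 ≤ a1 + (fuel : Int)) :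
    ((∀ x ∈ PySem.List.pyRange a1 a2 1, b15_ok p0 p1 q0 q1 x = true) ↔ a2 - a1 ≤ RL p0 p1 q0 q1 a1 fuel) := by
  simp only [PySem.List.mem_pyRange_one]
  constructor
  · intro h
    by_contra hlt
    push Not at hlt
    have hnn := RL_nonneg p0 p1 q0 q1 fuel a1
    have hstop := RL_stop p0 p1 q0 q1 fuel a1 (by omega)
    have := h (a1 + RL p0 p1 q0 q1 a1 fuel) ⟨by omega, by omega⟩
    rw [hstop] at this
    exact Bool.false_ne_true this
  · intro h x ⟨hx1, hx2⟩
    exact RL_ok p0 p1 q0 q1 fuel a1 x hx1 (by omega)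

theorem rowA_m1_aux (p0 p1 q0 q1 a1 : Int) (h1 : 1 ≤ a1) :
    ∀ (n : Nat) (s res : Int), s = 100 - (n : Int) → a1 < s → 0 ≤ res →
    a15_loopA2 1 1 (PySem.List.pyRange p0 (p1 + 1) 1) (PySem.List.pyRange q0 (q1 + 1) 1) a1
      (PySem.List.pyRange s 100 1) res =
    (none, if s - a1 ≤ RL p0 p1 q0 q1 a1 (99 - a1).toNat then max res (RL p0 p1 q0 q1 a1 (99 - a1).toNat) else res) := by
  intro n
  induction n with
  | zero =>
    intro s res hs hlt hres
    have hRle := RL_le p0 p1 q0 q1 (99 - a1).toNat a1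
    have hcond : ¬(s - a1 ≤ RL p0 p1 q0 q1 a1 (99 - a1).toNat) := by omega
    rw [PySem.List.pyRange_one_eq_nil (a := s) (b := 100) (by omega)]
    simp only [a15_loopA2]
    rw [if_neg hcond]
  | succ k ih =>
    intro s res hs hlt hres
    have hk : (k : Int) + 1 = ((k + 1 : Nat) : Int) := by push_cast; ring
    have hs99 : s ≤ 99 := by omega
    have hRnn := RL_nonneg p0 p1 q0 q1 (99 - a1).toNat a1
    have hRle := RL_le p0 p1 q0 q1 (99 - a1).toNat a1
    have hfuel : ((99 - a1).toNat : Int) = 99 - a1 := by omega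
    have hval := valid_iff_le_RL p0 p1 q0 q1 a1 s (99 - a1).toNat hlt (by omega)
    have hchar := loopX_char p0 p1 q0 q1 1 a1 s h1 (by omega)
    rw [PySem.List.pyRange_one_cons (a := s) (b := 100) (by omega)]
    simp only [a15_loopA2]
    by_cases hc : s - a1 ≤ RL p0 p1 q0 q1 a1 (99 - a1).toNat
    · rw [if_pos (hchar.mpr ⟨rfl, hval.mpr hc⟩)]
      rw [if_true]
      have hlen : ((PySem.List.pyRange a1 s 1).length : Int) = s - a1 := by
        rw [PySem.List.length_pyRange_one]; omega
      rw [hlen]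
      rw [ih (s + 1) (max res (s - a1)) (by push_cast at hs ⊢; omega) (by omega) (by omega)]
      split_ifs with h2 <;> [skip; skip] <;> simp only [Prod.mk.injEq, true_and] <;> omega
    · have hX : ¬(a15_loopX (PySem.List.pyRange p0 (p1 + 1) 1) (PySem.List.pyRange q0 (q1 + 1) 1)
          (PySem.List.pyRange a1 s 1) 1 (PySem.List.pyRange 1 1000 1) = true) :=
        fun h => hc (hval.mp (hchar.mp h).2)
      rw [if_neg hX]
      rw [ih (s + 1) res (by push_cast at hs ⊢; omega) (by omega) hres]
      rw [if_neg (by omega), if_neg (by omega)]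

theorem rowA_m1 (p0 p1 q0 q1 a1 res : Int) (h1 : 1 ≤ a1) (h2 : a1 ≤ 98) (h3 : 0 ≤ res) :
    a15_loopA2 1 1 (PySem.List.pyRange p0 (p1 + 1) 1) (PySem.List.pyRange q0 (q1 + 1) 1) a1
      (PySem.List.pyRange (a1 + 1) 100 1) res =
    (none, max res (RL p0 p1 q0 q1 a1 (99 - a1).toNat)) := by
  have hRnn := RL_nonneg p0 p1 q0 q1 (99 - a1).toNat a1
  rw [rowA_m1_aux p0 p1 q0 q1 a1 h1 (99 - a1).toNat (a1 + 1) res (by omega) (by omega) h3]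
  split_ifs with h <;> simp only [Prod.mk.injEq, true_and] <;> omega

theorem rowA_none (p0 p1 q0 q1 tf m a1 : Int) (h1 : 1 ≤ a1)
    (hbad : tf ≠ 1 ∨ b15_ok p0 p1 q0 q1 a1 = false) :
    ∀ (l : List Int) (res : Int), (∀ a2 ∈ l, a1 < a2 ∧ a2 ≤ 100) →
    a15_loopA2 tf m (PySem.List.pyRange p0 (p1 + 1) 1) (PySem.List.pyRange q0 (q1 + 1) 1) a1 l res = (none, res) := by
  intro l
  induction l with
  | nil => intro res _; simp [a15_loopA2]
  | cons a2 rest ih =>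
    intro res hmem
    obtain ⟨hlt, hle⟩ := hmem a2 List.mem_cons_self
    have hchar := loopX_char p0 p1 q0 q1 tf a1 a2 h1 hle
    have hX : ¬(a15_loopX (PySem.List.pyRange p0 (p1 + 1) 1) (PySem.List.pyRange q0 (q1 + 1) 1)
        (PySem.List.pyRange a1 a2 1) tf (PySem.List.pyRange 1 1000 1) = true) := by
      intro h
      obtain ⟨htf, hall⟩ := hchar.mp h
      rcases hbad with hb | hb
      · exact hb htf
      · have := hall a1 (by rw [PySem.List.mem_pyRange_one]; omega)
        rw [hb] at this
        exact Bool.false_ne_true this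
    simp only [a15_loopA2]
    rw [if_neg hX]
    exact ih res (fun x hx => hmem x (List.mem_cons_of_mem _ hx))

theorem rowA_first (p0 p1 q0 q1 m a1 res : Int) (h1 : 1 ≤ a1) (h2 : a1 ≤ 98) (hm : m ≠ 1)
    (hok : b15_ok p0 p1 q0 q1 a1 = true) :
    a15_loopA2 1 m (PySem.List.pyRange p0 (p1 + 1) 1) (PySem.List.pyRange q0 (q1 + 1) 1) a1
      (PySem.List.pyRange (a1 + 1) 100 1) res = (some 1, res) := by
  rw [PySem.List.pyRange_one_cons (a := a1 + 1) (b := 100) (by omega)]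
  simp only [a15_loopA2]
  have hchar := loopX_char p0 p1 q0 q1 1 a1 (a1 + 1) h1 (by omega)
  have hall : ∀ x ∈ PySem.List.pyRange a1 (a1 + 1) 1, b15_ok p0 p1 q0 q1 x = true := by
    intro x hx
    have := PySem.List.mem_pyRange_one.mp hx
    have hxe : x = a1 := by omega
    rw [hxe]; exact hok
  rw [if_pos (hchar.mpr ⟨rfl, hall⟩)]
  rw [if_neg hm]
  have hlen : ((PySem.List.pyRange a1 (a1 + 1) 1).length : Int) = 1 := by
    rw [PySem.List.length_pyRange_one]; omega
  rw [hlen]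

theorem outer_tfne (p0 p1 q0 q1 tf m : Int) (htf : tf ≠ 1) :
    ∀ (l : List Int) (res : Int), (∀ a1 ∈ l, 1 ≤ a1 ∧ a1 ≤ 98) →
    a15_loopA1 tf m (PySem.List.pyRange p0 (p1 + 1) 1) (PySem.List.pyRange q0 (q1 + 1) 1) l res = res := by
  intro l
  induction l with
  | nil => intro res _; simp [a15_loopA1]
  | cons a1 rest ih =>
    intro res hmem
    obtain ⟨hge, hle⟩ := hmem a1 List.mem_cons_self
    simp only [a15_loopA1]
    rw [rowA_none p0 p1 q0 q1 tf m a1 hge (Or.inl htf) _ res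
      (fun a2 ha2 => by have := PySem.List.mem_pyRange_one.mp ha2; omega)]
    exact ih res (fun x hx => hmem x (List.mem_cons_of_mem _ hx))

theorem outer_mne (p0 p1 q0 q1 m : Int) (hm : m ≠ 1) :
    ∀ (l : List Int) (res : Int), (∀ a1 ∈ l, 1 ≤ a1 ∧ a1 ≤ 98) →
    a15_loopA1 1 m (PySem.List.pyRange p0 (p1 + 1) 1) (PySem.List.pyRange q0 (q1 + 1) 1) l res =
    (if l.any (b15_ok p0 p1 q0 q1) then 1 else res) := by
  intro l
  induction l with
  | nil => intro res _; simp [a15_loopA1]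
  | cons a1 rest ih =>
    intro res hmem
    obtain ⟨hge, hle⟩ := hmem a1 List.mem_cons_self
    simp only [a15_loopA1]
    by_cases hok : b15_ok p0 p1 q0 q1 a1 = true
    · rw [rowA_first p0 p1 q0 q1 m a1 res hge hle hm hok]
      simp [hok]
    · rw [rowA_none p0 p1 q0 q1 1 m a1 hge (Or.inr (by simpa using hok)) _ res
        (fun a2 ha2 => by have := PySem.List.mem_pyRange_one.mp ha2; omega)]
      have hrec := ih res (fun x hx => hmem x (List.mem_cons_of_mem _ hx))
      simpa [hok] using hrec

theorem outer_m1 (p0 p1 q0 q1 : Int) :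
    ∀ (l : List Int) (res : Int), (∀ a1 ∈ l, 1 ≤ a1 ∧ a1 ≤ 98) → 0 ≤ res →
    a15_loopA1 1 1 (PySem.List.pyRange p0 (p1 + 1) 1) (PySem.List.pyRange q0 (q1 + 1) 1) l res =
    l.foldl (fun r a1 => max r (RL p0 p1 q0 q1 a1 (99 - a1).toNat)) res := by
  intro l
  induction l with
  | nil => intro res _ _; simp [a15_loopA1]
  | cons a1 rest ih =>
    intro res hmem hres
    obtain ⟨hge, hle⟩ := hmem a1 List.mem_cons_self
    simp only [a15_loopA1, List.foldl_cons]
    rw [rowA_m1 p0 p1 q0 q1 a1 res hge hle hres]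
    have hRnn := RL_nonneg p0 p1 q0 q1 (99 - a1).toNat a1
    exact ih (max res (RL p0 p1 q0 q1 a1 (99 - a1).toNat))
      (fun x hx => hmem x (List.mem_cons_of_mem _ hx)) (by omega)

theorem foldl_max_pull (g : Int → Int) : ∀ (l : List Int) (a v : Int),
    l.foldl (fun r i => max r (g i)) (max a v) = max (l.foldl (fun r i => max r (g i)) a) v := by
  intro l
  induction l with
  | nil => intro a v; simp
  | cons x xs ih =>
    intro a v
    simp only [List.foldl_cons]
    have h : max (max a v) (g x) = max (max a (g x)) v := by omega
    rw [h, ih]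

theorem foldl_max_reverse (g : Int → Int) : ∀ (l : List Int) (a : Int),
    l.reverse.foldl (fun r i => max r (g i)) a = l.foldl (fun r i => max r (g i)) a := by
  intro l
  induction l with
  | nil => intro a; simp
  | cons x xs ih =>
    intro a
    simp only [List.reverse_cons, List.foldl_append, List.foldl_cons, List.foldl_nil]
    rw [ih, ← foldl_max_pull]

theorem scan_eq (p0 p1 q0 q1 : Int) : ∀ (n : Nat), n ≤ 98 → ∀ (best : Int),
    b15_scan p0 p1 q0 q1 (PySem.List.pyRange (n : Int) 0 (-1)) (best, RL p0 p1 q0 q1 ((n : Int) + 1) (98 - (n : Int)).toNat) =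
    ((PySem.List.pyRange (n : Int) 0 (-1)).foldl (fun r i => max r (RL p0 p1 q0 q1 i (99 - i).toNat)) best,
      RL p0 p1 q0 q1 1 98) := by
  intro n
  induction n with
  | zero =>
    intro _ best
    rw [PySem.List.pyRange_neg_one_eq_nil (by omega)]
    norm_num
    rfl
  | succ k ih =>
    intro hk best
    have hs : ((k + 1 : Nat) : Int) = (k : Int) + 1 := by push_cast; ring
    rw [PySem.List.pyRange_neg_one_cons (a := ((k + 1 : Nat) : Int)) (b := 0) (by omega)]
    simp only [b15_scan, List.foldl_cons]
    have hrun : (if b15_ok p0 p1 q0 q1 ((k + 1 : Nat) : Int) then RL p0 p1 q0 q1 (((k + 1 : Nat) : Int) + 1) (98 - ((k + 1 : Nat) : Int)).toNat + 1 else 0) =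
        RL p0 p1 q0 q1 ((k + 1 : Nat) : Int) (99 - ((k + 1 : Nat) : Int)).toNat := by
      have hfe : (99 - ((k + 1 : Nat) : Int)).toNat = (98 - ((k + 1 : Nat) : Int)).toNat + 1 := by omega
      rw [hfe]
      simp only [RL]
    rw [hrun]
    have hm1 : ((k + 1 : Nat) : Int) - 1 = (k : Int) := by push_cast; ring
    rw [hm1]
    have harg : RL p0 p1 q0 q1 (((k : Int)) + 1) (98 - (k : Int)).toNat =
        RL p0 p1 q0 q1 ((k + 1 : Nat) : Int) (99 - ((k + 1 : Nat) : Int)).toNat := by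
      rw [hs]
      congr 1
      omega
    rw [← harg] at *
    rw [ih (by omega) (max best (RL p0 p1 q0 q1 ((k:Int) + 1) (98 - (k : Int)).toNat))]

-- ===== VERDICT (by name: the statement is the Claim_ definition above) =====
theorem task_15_spec : Claim_equal_task_15 := by
  intro tf m P Q _ hpre
  unfold Spec_task_15
  obtain ⟨hP, hQ⟩ := hpre
  rcases P with _ | ⟨p0, P'⟩
  · simp at hP
  rcases P' with _ | ⟨p1, P''⟩
  · simp at hP
  rcases Q with _ | ⟨q0, Q'⟩
  · simp at hQ
  rcases Q' with _ | ⟨q1, Q''⟩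
  · simp at hQ
  have hg1 : PySem.List.pyGet? (p0 :: p1 :: P'') 0 = some p0 := PySem.List.pyGet?_zero_cons p0 (p1 :: P'')
  have hg2 : PySem.List.pyGet? (p0 :: p1 :: P'') 1 = some p1 := by
    rw [show (1 : Int) = ((1 : Nat) : Int) by norm_num, PySem.List.pyGet?_natCast]
    simp
  have hg3 : PySem.List.pyGet? (q0 :: q1 :: Q'') 0 = some q0 := PySem.List.pyGet?_zero_cons q0 (q1 :: Q'')
  have hg4 : PySem.List.pyGet? (q0 :: q1 :: Q'') 1 = some q1 := by
    rw [show (1 : Int) = ((1 : Nat) : Int) by norm_num, PySem.List.pyGet?_natCast]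
    simp
  simp only [task_15, task_15_alt, hg1, hg2, hg3, hg4]
  have hb : ∀ a1 ∈ PySem.List.pyRange (1 : Int) 99 1, 1 ≤ a1 ∧ a1 ≤ 98 := by
    intro a1 ha
    have := PySem.List.mem_pyRange_one.mp ha
    omega
  by_cases htf : tf = 1
  · subst htf
    rw [if_neg (by omega)]
    by_cases hm : m = 1
    · subst hm
      rw [if_neg (by omega)]
      rw [outer_m1 p0 p1 q0 q1 _ 0 hb (le_refl 0)]
      have h98 : ((98 : Nat) : Int) = (98 : Int) := by norm_num
      have hsc := scan_eq p0 p1 q0 q1 98 (le_refl 98) 0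
      rw [h98] at hsc
      have hinit : RL p0 p1 q0 q1 ((98 : Int) + 1) ((98 : Int) - 98).toNat = 0 := by
        norm_num
        rfl
      rw [hinit] at hsc
      have he : PySem.List.pyRange (98 : Int) 0 (-1) = (PySem.List.pyRange 1 99).reverse := by
        rw [PySem.List.pyRange_neg_one_eq_reverse 98 0]
        norm_num
      rw [he] at hsc ⊢
      rw [hsc, foldl_max_reverse]
    · rw [if_pos hm]
      rw [outer_mne p0 p1 q0 q1 m hm _ 0 hb]
  · rw [if_pos htf]
    rw [outer_tfne p0 p1 q0 q1 tf m htf _ 0 hb]
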